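-- pv_equiv track=rewrite | github.com/DeleteQuaKhu/short-script | plot.py | interleave_sublists
-- ===== SOURCE A (Python) =====
-- def interleave_sublists(original_list, n):
--     # Calculate the number of sublists
--     k = len(original_list) // n
--
--     # Split the original list into k sublists
--     sublists = [original_list[i*n:(i+1)*n] for i in range(k)]
--
--     # Handle the case where the original list is not a multiple of n
--     if len(original_list) % n != 0:
--         sublists.append(original_list[k*n:])
--
--     # Create the interleaved list
--     interleaved_list = []
--     for i in range(len(sublists) - 1):
--         for j in range(len(sublists[i])):
--             interleaved_list.append(sublists[i][j]+ sublists[i+1][j])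
--             # interleaved_list.append()
--
--     return interleaved_list
-- ===== SOURCE B (Python) =====
-- def interleave_sublists(original_list, n):
--     # Single flat pass: element idx of chunk i pairs with element idx+n of chunk i+1.
--     k = len(original_list) // n
--     num_sublists = k + (1 if len(original_list) % n else 0)
--     return [original_list[idx] + original_list[idx + n]
--             for idx in range(max(num_sublists - 1, 0) * n)]
-- ===== Notes on version B (the rewrite author's own statement) =====
-- stated objective: simpler
-- what changed: B eliminates A's intermediate list-of-sublists and its two nested loops, producing the result in one flat stride-n pass that pairs element idx with element idx+n.
import Mathlib
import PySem

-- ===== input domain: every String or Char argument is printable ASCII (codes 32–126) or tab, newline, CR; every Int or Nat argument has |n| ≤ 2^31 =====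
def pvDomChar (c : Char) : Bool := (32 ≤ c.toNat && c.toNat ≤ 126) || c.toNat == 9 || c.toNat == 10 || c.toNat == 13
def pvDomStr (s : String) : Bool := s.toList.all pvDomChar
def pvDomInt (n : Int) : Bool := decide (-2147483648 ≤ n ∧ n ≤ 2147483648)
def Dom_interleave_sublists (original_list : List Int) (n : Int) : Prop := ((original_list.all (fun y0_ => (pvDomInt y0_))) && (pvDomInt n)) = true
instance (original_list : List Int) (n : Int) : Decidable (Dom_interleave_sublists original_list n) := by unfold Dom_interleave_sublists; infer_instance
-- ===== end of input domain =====

-- B removes A's intermediate list-of-sublists and its two nested loops, producing the same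
-- result in one flat stride-n pass (element idx paired with element idx+n); same cost, simpler.

-- ===== PORT A =====
def interleave_sublists (original_list : List Int) (n : Int) : List Int :=
  -- k = len(original_list) // n
  let k : Int := PySem.Int.floordiv (original_list.length : Int) n
  -- sublists = [original_list[i*n:(i+1)*n] for i in range(k)]
  let sublists : List (List Int) :=
    (PySem.List.pyRange 0 k 1).map
      (fun i => PySem.List.slice original_list (some (i * n)) (some ((i + 1) * n)))
  -- if len(original_list) % n != 0: sublists.append(original_list[k*n:])
  let sublists : List (List Int) :=
    if PySem.Int.mod (original_list.length : Int) n ≠ 0 then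
      sublists ++ [PySem.List.slice original_list (some (k * n)) none]
    else sublists
  -- for i in range(len(sublists)-1): for j in range(len(sublists[i])):
  --     interleaved_list.append(sublists[i][j] + sublists[i+1][j])
  -- (indexing is in range on every input admitted by Pre_, so pyGetD's default is never used there)
  (PySem.List.pyRange 0 ((sublists.length : Int) - 1) 1).foldl
    (fun acc i =>
      (PySem.List.pyRange 0 (((PySem.List.pyGetD sublists i []).length : Int)) 1).foldl
        (fun acc2 j =>
          acc2 ++ [PySem.List.pyGetD (PySem.List.pyGetD sublists i []) j 0 +
                   PySem.List.pyGetD (PySem.List.pyGetD sublists (i + 1) []) j 0])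
        acc)
    []

-- ===== PORT B =====
def interleave_sublists_alt (original_list : List Int) (n : Int) : List Int :=
  let k : Int := PySem.Int.floordiv (original_list.length : Int) n
  let num_sublists : Int :=
    k + (if PySem.Int.mod (original_list.length : Int) n ≠ 0 then 1 else 0)
  (PySem.List.pyRange 0 (max (num_sublists - 1) 0 * n) 1).map
    (fun idx => PySem.List.pyGetD original_list idx 0 +
                PySem.List.pyGetD original_list (idx + n) 0)

-- ===== PRECONDITION & SPEC =====
-- Pre_ excludes exactly the inputs on which the Python A raises: n = 0 (ZeroDivisionError) and
-- n > 0 with len % n ≠ 0 and n < len (IndexError: the trailing chunk is shorter than chunk i before it).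
def Pre_interleave_sublists (original_list : List Int) (n : Int) : Prop :=
  n ≠ 0 ∧ (n < 0 ∨ PySem.Int.mod (original_list.length : Int) n = 0 ∨ (original_list.length : Int) < n)
instance (original_list : List Int) (n : Int) : Decidable (Pre_interleave_sublists original_list n) := by
  unfold Pre_interleave_sublists; infer_instance

def pvWitness_interleave_sublists : List Int × Int := ([1, 2, 3, 4, 5, 6], 2)

def Spec_interleave_sublists (original_list : List Int) (n : Int) (out : List Int) : Prop := out = interleave_sublists_alt original_list n
instance (original_list : List Int) (n : Int) (out : List Int) : Decidable (Spec_interleave_sublists original_list n out) := by unfold Spec_interleave_sublists; infer_instance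

-- ===== CLAIM (what is proved, stated in full; the proofs are below) =====
def Claim_equal_interleave_sublists : Prop := ∀ (original_list : List Int) (n : Int), Dom_interleave_sublists original_list n → Pre_interleave_sublists original_list n → Spec_interleave_sublists original_list n (interleave_sublists original_list n)

-- ===== LEMMAS AND PROOFS =====

-- Flattening K chunks of N indices each into one flat range of K*N indices.
theorem interleave_chunk_flatMap (g : Nat → Int) (N : Nat) :
    ∀ K : Nat, (List.range K).flatMap (fun i => (List.range N).map (fun j => g (i * N + j)))
      = (List.range (K * N)).map g := by
  intro K
  induction K with
  | zero => simp
  | succ K ih =>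
    rw [List.range_succ, List.flatMap_append, ih, Nat.succ_mul, List.range_add, List.map_append]
    simp [Function.comp, Nat.add_comm]

-- Reading position j of the chunk original_list[a : a+N] is reading position a+j of the list.
theorem interleave_chunk_getD (ol : List Int) (a N j : Nat) (hj : j < N) (h : a + N ≤ ol.length) :
    ((ol.drop a).take N).getD j 0 = ol.getD (a + j) 0 := by
  have h1 : j < ((ol.drop a).take N).length := by
    simp only [List.length_take, List.length_drop]; omega
  have h2 : a + j < ol.length := by omega
  rw [List.getD_eq_getElem _ _ h1, List.getD_eq_getElem _ _ h2]
  simp [List.getElem_take, List.getElem_drop]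

-- For negative n, A builds no pair of adjacent sublists and returns [].
theorem portA_neg (ol : List Int) (n : Int) (hneg : n < 0) : interleave_sublists ol n = [] := by
  unfold interleave_sublists
  have hk : PySem.Int.floordiv (ol.length : Int) n ≤ 0 := by
    have h1 := PySem.Int.floordiv_mul_add_mod (ol.length : Int) n
    have h2 := PySem.Int.mod_neg_bounds (ol.length : Int) hneg
    nlinarith [Int.natCast_nonneg ol.length]
  by_cases hm : PySem.Int.mod (ol.length : Int) n = 0
  · simp [hm, PySem.List.pyRange_one_eq_nil hk]
  · simp [hm, PySem.List.pyRange_one_eq_nil hk,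
      PySem.List.pyRange_one_eq_nil (le_refl (0 : Int))]

-- For negative n, B's range bound max(num_sublists-1, 0) * n is nonpositive, so B returns [].
theorem portB_neg (ol : List Int) (n : Int) (hneg : n < 0) : interleave_sublists_alt ol n = [] := by
  unfold interleave_sublists_alt
  simp [PySem.List.pyRange_one_eq_nil
    (mul_nonpos_of_nonneg_of_nonpos (le_max_right _ 0) hneg.le)]

-- 0 < len < n with a nonzero remainder: the only sublist is the short one, A returns [].
theorem portA_small (ol : List Int) (N : Nat) (hm : ol.length % N ≠ 0) (hlt : ol.length < N) :
    interleave_sublists ol (N : Int) = [] := by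
  unfold interleave_sublists
  rw [PySem.Int.floordiv_natCast, Nat.div_eq_of_lt hlt, PySem.Int.mod_natCast]
  have hc : ((ol.length % N : Nat) : Int) ≠ 0 := by exact_mod_cast hm
  simp only [if_pos hc]
  simp [PySem.List.pyRange_one_eq_nil (le_refl (0 : Int))]

-- same situation on B's side: num_sublists = 1, so the range is empty.
theorem portB_small (ol : List Int) (N : Nat) (hm : ol.length % N ≠ 0) (hlt : ol.length < N) :
    interleave_sublists_alt ol (N : Int) = [] := by
  unfold interleave_sublists_alt
  rw [PySem.Int.floordiv_natCast, Nat.div_eq_of_lt hlt, PySem.Int.mod_natCast]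
  have hc : ((ol.length % N : Nat) : Int) ≠ 0 := by exact_mod_cast hm
  simp only [if_pos hc]
  simp [PySem.List.pyRange_one_eq_nil (le_refl (0 : Int))]

-- Main case, B's side: with n = N > 0 and N ∣ len, B is the flat map over (len/N - 1) * N indices.
theorem portB_char (ol : List Int) (N : Nat) (hm : ol.length % N = 0) :
    interleave_sublists_alt ol (N : Int) =
      (List.range ((ol.length / N - 1) * N)).map
        (fun idx => ol.getD idx 0 + ol.getD (idx + N) 0) := by
  unfold interleave_sublists_alt
  have hmod : PySem.Int.mod (ol.length : Int) (N : Int) = 0 := by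
    rw [PySem.Int.mod_natCast, hm]; rfl
  have hdiv := PySem.Int.floordiv_natCast ol.length N
  simp only [hdiv, hmod, ne_eq, not_true_eq_false, if_false, add_zero]
  have hmax : max (((ol.length / N : Nat) : Int) - 1) 0 * (N : Int)
      = (((ol.length / N - 1) * N : Nat) : Int) := by
    rcases hK : ol.length / N with _ | K'
    · simp
    · have h1 : ((K' + 1 : Nat) : Int) - 1 = (K' : Int) := by push_cast; ring
      rw [h1, max_eq_left (Int.natCast_nonneg K')]
      push_cast; ring
  rw [hmax, PySem.List.pyRange_zero_natCast, List.map_map]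
  refine List.map_congr_left ?_
  intro idx _
  simp only [Function.comp, ← Nat.cast_add, PySem.List.pyGetD_natCast]

-- Main case, A's side: the nested loops over full chunks flatten to the same map.
theorem portA_char (ol : List Int) (N : Nat) (hm : ol.length % N = 0) :
    interleave_sublists ol (N : Int) =
      (List.range ((ol.length / N - 1) * N)).map
        (fun idx => ol.getD idx 0 + ol.getD (idx + N) 0) := by
  unfold interleave_sublists
  have hmod : PySem.Int.mod (ol.length : Int) (N : Int) = 0 := by
    rw [PySem.Int.mod_natCast, hm]; rfl
  have hdiv := PySem.Int.floordiv_natCast ol.length N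
  have hKM : ol.length / N * N = ol.length := Nat.div_mul_cancel (Nat.dvd_of_mod_eq_zero hm)
  simp only [hdiv, hmod, ne_eq, not_true_eq_false, if_false]
  rcases hK : ol.length / N with _ | K'
  · -- fewer than two sublists: the outer loop body never runs
    rw [hK] at hKM
    simp [PySem.List.pyRange_zero_natCast]
  · have hM : (K' + 1) * N = ol.length := by rw [← hK]; exact hKM
    rw [PySem.List.pyRange_zero_natCast, List.map_map]
    set sl : Nat → List Int :=
      (fun i => PySem.List.slice ol (some (i * (N : Int))) (some ((i + 1) * (N : Int)))) ∘
        (fun k : Nat => (k : Int)) with hsl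
    have hlen : ((List.range (K' + 1)).map sl).length = K' + 1 := by simp
    rw [hlen]
    have houter : ((K' + 1 : Nat) : Int) - 1 = ((K' : Nat) : Int) := by push_cast; ring
    rw [houter, PySem.List.pyRange_zero_natCast]
    -- the inner append loop becomes a map, the outer loop a flatMap over the K' chunk starts
    simp only [PySem.List.foldl_append_singleton_eq_map, PySem.List.foldl_append_eq_flatMap,
      List.nil_append, List.flatMap_map]
    rw [List.flatMap_def, List.map_congr_left (g := fun i : Nat =>
        (List.range N).map (fun j => ol.getD (i * N + j) 0 + ol.getD ((i * N + j) + N) 0)) ?_,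
      ← List.flatMap_def]
    case _ =>
      have hfm := interleave_chunk_flatMap
        (fun idx => ol.getD idx 0 + ol.getD (idx + N) 0) N K'
      simp only at hfm
      rw [hfm]
      simp
    intro i hi
    have hi' : i < K' := List.mem_range.mp hi
    -- the i-th and (i+1)-th sublists are full chunks of length N
    have hchunk : ∀ t : Nat, t < K' + 1 → sl t = (ol.drop (t * N)).take N := by
      intro t ht
      have h1 : ((t : Nat) : Int) * (N : Int) = ((t * N : Nat) : Int) := by push_cast; ring
      have h2 : (((t : Nat) : Int) + 1) * (N : Int) = ((t * N : Nat) : Int) + (N : Int) := by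
        push_cast; ring
      simp only [hsl, Function.comp, h1, h2, PySem.List.slice_natCast_add]
    have hget : ∀ t : Nat, t < K' + 1 →
        PySem.List.pyGetD ((List.range (K' + 1)).map sl) ((t : Nat) : Int) []
          = (ol.drop (t * N)).take N := by
      intro t ht
      rw [PySem.List.pyGetD_natCast, PySem.List.getD_map_range sl _ _ _ ht, hchunk t ht]
    have hbound : ∀ t : Nat, t < K' + 1 → t * N + N ≤ ol.length := by
      intro t ht
      calc t * N + N = (t + 1) * N := by ring
        _ ≤ (K' + 1) * N := Nat.mul_le_mul_right N (by omega)
        _ = ol.length := hM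
    have hfull : ((ol.drop (i * N)).take N).length = N := by
      rw [List.length_take, List.length_drop]
      have := hbound i (by omega)
      omega
    rw [hget i (by omega)]
    have hgi1 : ((i : Nat) : Int) + 1 = (((i + 1 : Nat)) : Int) := by push_cast; ring
    rw [hgi1, hget (i + 1) (by omega), hfull, PySem.List.pyRange_zero_natCast, List.map_map]
    refine List.map_congr_left ?_
    intro j hj
    have hj' : j < N := List.mem_range.mp hj
    simp only [Function.comp, PySem.List.pyGetD_natCast]
    rw [interleave_chunk_getD ol (i * N) N j hj' (hbound i (by omega)),
        interleave_chunk_getD ol ((i + 1) * N) N j hj' (hbound (i + 1) (by omega))]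
    have : (i + 1) * N + j = i * N + j + N := by ring
    rw [this]

-- ===== VERDICT (by name: the statement is the Claim_ definition above) =====
theorem interleave_sublists_spec : Claim_equal_interleave_sublists := by
  intro ol n _ hpre
  obtain ⟨hn0, hcase⟩ := hpre
  unfold Spec_interleave_sublists
  by_cases hneg : n < 0
  · rw [portA_neg ol n hneg, portB_neg ol n hneg]
  · have hpos : 0 < n := lt_of_le_of_ne (not_lt.mp hneg) (Ne.symm hn0)
    obtain ⟨N, rfl⟩ := Int.eq_ofNat_of_zero_le hpos.le
    have hN : 0 < N := by exact_mod_cast hpos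
    by_cases hm : ol.length % N = 0
    · rw [portA_char ol N hm, portB_char ol N hm]
    · have hlt : ol.length < N := by
        rcases hcase with h | h | h
        · exact absurd h hneg
        · rw [PySem.Int.mod_natCast] at h
          exact absurd (by exact_mod_cast h) hm
        · exact_mod_cast h
      rw [portA_small ol N hm hlt, portB_small ol N hm hlt]
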